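-- pv_equiv track=rewrite | github.com/rkhullar/multilang-code-scratches | src/main/python/problems/trapping_rain_water/v3.py | iter_max_arr
-- ===== SOURCE A (Python) =====
-- from typing import Iterator, List
--
-- def iter_max_arr(data: List[int], reverse: bool = False) -> Iterator[int]:
--     curr = [0, len(data)-1][reverse]
--     step = [1, -1][reverse]
--     max_idx = curr
--     while 0 <= curr < len(data):
--         if data[curr] > data[max_idx]:
--             max_idx = curr
--         yield max_idx
--         curr += step
-- ===== SOURCE B (Python) =====
-- from typing import Iterator, List
--
-- def iter_max_arr(data: List[int], reverse: bool = False) -> Iterator[int]: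
--     n = len(data)
--     order = range(n - 1, -1, -1) if reverse else range(n)
--     # stage 1: collect the strict-record positions (t = step number, i = index)
--     records = []
--     for t, i in enumerate(order):
--         if not records or data[i] > data[records[-1][1]]:
--             records.append((t, i))
--     # stage 2: expand each record into its run of repetitions
--     for k, (t, i) in enumerate(records):
--         end = records[k + 1][0] if k + 1 < len(records) else n
--         for _ in range(t, end):
--             yield i
-- ===== Notes on version B (the rewrite author's own statement) =====
-- stated objective: alternative
-- what changed: Replaces the single pass that yields the running best at every step by two staged passes: first collect only the strict-record (argmax-change) positions, then run-length-expand each record index over the gap to the next record.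
import Mathlib
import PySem

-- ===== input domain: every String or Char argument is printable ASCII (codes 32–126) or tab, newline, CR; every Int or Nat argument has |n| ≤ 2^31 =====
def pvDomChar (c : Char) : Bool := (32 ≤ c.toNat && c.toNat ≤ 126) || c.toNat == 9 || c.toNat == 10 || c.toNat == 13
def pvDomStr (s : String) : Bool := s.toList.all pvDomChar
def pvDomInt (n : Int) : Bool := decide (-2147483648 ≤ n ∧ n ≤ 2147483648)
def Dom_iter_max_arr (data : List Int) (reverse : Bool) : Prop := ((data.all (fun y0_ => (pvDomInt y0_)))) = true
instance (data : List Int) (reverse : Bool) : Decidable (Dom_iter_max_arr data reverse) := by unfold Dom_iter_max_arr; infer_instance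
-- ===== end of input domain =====

-- B replaces A's single emit-at-every-step cursor loop by two staged passes — collect the
-- strict-record positions, then run-length-expand each record over the gap to the next
-- (objective: alternative). Return-value equivalence; both are generators in Python.

-- ===== PORT A =====
-- while 0 <= curr < len(data): … ; curr += step.  The loop moves by ±1 from one end, so it runs at
-- most data.length iterations: fuel = data.length makes the recursion a faithful transliteration.
-- All indexing is in range when the guard holds, so data[i] is ported as pyGetD data i 0 (exact here).
def aLoop (data : List Int) (step : Int) : Nat → Int → Int → List Int
  | 0, _, _ => []
  | fuel + 1, curr, maxIdx =>
    if 0 ≤ curr ∧ curr < (data.length : Int) then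
      let m := if PySem.List.pyGetD data curr 0 > PySem.List.pyGetD data maxIdx 0 then curr else maxIdx
      m :: aLoop data step fuel (curr + step) m
    else []

def iter_max_arr (data : List Int) (reverse : Bool) : List Int :=
  let curr : Int := if reverse then (data.length : Int) - 1 else 0
  let step : Int := if reverse then -1 else 1
  aLoop data step data.length curr curr

-- ===== PORT B =====
-- stage 1: for t, i in enumerate(order): if not records or data[i] > data[records[-1][1]]: records.append((t, i))
-- (all indices drawn from range(...) are in range, so data[i] is ported as pyGetD data i 0, exact here)
def bEnum : Nat → List Int → List (Nat × Int)
  | _, [] => []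
  | t, i :: rest => (t, i) :: bEnum (t + 1) rest

def bStep (data : List Int) (records : List (Nat × Int)) (ti : Nat × Int) : List (Nat × Int) :=
  match records.getLast? with
  | none => records ++ [ti]
  | some (_, j) =>
    if PySem.List.pyGetD data ti.2 0 > PySem.List.pyGetD data j 0 then records ++ [ti] else records

-- stage 2: for k, (t, i) in enumerate(records): end = next record's t or n; yield i for range(t, end)
def bExpand (n : Nat) : List (Nat × Int) → List Int
  | [] => []
  | (t, i) :: rest =>
    let e := match rest with | [] => n | (t', _) :: _ => t'
    List.replicate (e - t) i ++ bExpand n rest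

def iter_max_arr_alt (data : List Int) (reverse : Bool) : List Int :=
  let order :=
    if reverse then PySem.List.pyRange ((data.length : Int) - 1) (-1) (-1)
    else PySem.List.pyRange 0 (data.length : Int) 1
  let records := List.foldl (bStep data) [] (bEnum 0 order)
  bExpand data.length records

-- ===== PRECONDITION & SPEC =====
def Spec_iter_max_arr (data : List Int) (reverse : Bool) (out : List Int) : Prop := out = iter_max_arr_alt data reverse
instance (data : List Int) (reverse : Bool) (out : List Int) : Decidable (Spec_iter_max_arr data reverse out) := by unfold Spec_iter_max_arr; infer_instance

-- ===== CLAIM (what is proved, stated in full; the proofs are below) =====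
def Claim_equal_iter_max_arr : Prop := ∀ (data : List Int) (reverse : Bool), Dom_iter_max_arr data reverse → Spec_iter_max_arr data reverse (iter_max_arr data reverse)

-- ===== LEMMAS AND PROOFS =====

-- Proof-side bridge: the running-best fold over the order list (emits the updated best at each step).
def bGo (data : List Int) : Option Int → List Int → List Int
  | _, [] => []
  | best, i :: rest =>
    let b' :=
      match best with
      | none => i
      | some b => if PySem.List.pyGetD data i 0 > PySem.List.pyGetD data b 0 then i else b
    b' :: bGo data (some b') rest

theorem bGo_none_eq_some (data : List Int) (c : Int) (rest : List Int) :
    bGo data none (c :: rest) = bGo data (some c) (c :: rest) := by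
  simp [bGo]

-- Forward loop: with enough fuel, A's loop from curr is the running-best fold over range(curr, len).
theorem aLoop_fwd (data : List Int) (fuel : Nat) :
    ∀ (curr m : Int), 0 ≤ curr → (data.length : Int) ≤ curr + fuel →
      aLoop data 1 fuel curr m = bGo data (some m) (PySem.List.pyRange curr (data.length : Int) 1) := by
  induction fuel with
  | zero =>
    intro curr m h0 hle
    rw [PySem.List.pyRange_one_eq_nil (by simpa using hle)]
    simp [aLoop, bGo]
  | succ n ih =>
    intro curr m h0 hle
    by_cases hlt : curr < (data.length : Int)
    · rw [PySem.List.pyRange_one_cons hlt]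
      simp only [aLoop, bGo]
      rw [if_pos (show (0:Int) ≤ curr ∧ curr < (data.length : Int) from ⟨h0, hlt⟩)]
      congr 1
      exact ih (curr + 1) _ (by omega) (by push_cast at hle ⊢; omega)
    · rw [PySem.List.pyRange_one_eq_nil (by omega)]
      simp [aLoop, bGo, hlt]

-- Backward loop: A's loop from curr (step -1) is the running-best fold over range(curr, -1, -1).
theorem aLoop_bwd (data : List Int) (fuel : Nat) :
    ∀ (curr m : Int), curr < (data.length : Int) → curr < (fuel : Int) →
      aLoop data (-1) fuel curr m = bGo data (some m) (PySem.List.pyRange curr (-1) (-1)) := by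
  induction fuel with
  | zero =>
    intro curr m hlt hf
    rw [PySem.List.pyRange_neg_one_eq_nil (by omega)]
    simp [aLoop, bGo]
  | succ n ih =>
    intro curr m hlt hf
    by_cases h0 : 0 ≤ curr
    · rw [PySem.List.pyRange_neg_one_cons (by omega)]
      simp only [aLoop, bGo]
      rw [if_pos (show (0:Int) ≤ curr ∧ curr < (data.length : Int) from ⟨h0, hlt⟩)]
      congr 1
      rw [show curr + -1 = curr - 1 by ring]
      exact ih (curr - 1) _ (by omega) (by push_cast at hf ⊢; omega)
    · rw [PySem.List.pyRange_neg_one_eq_nil (by omega)]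
      simp [aLoop, bGo, h0]

-- A equals the running-best fold over its order list.
theorem A_eq_bGo (data : List Int) (reverse : Bool) :
    iter_max_arr data reverse =
      bGo data none (if reverse then PySem.List.pyRange ((data.length : Int) - 1) (-1) (-1)
                     else PySem.List.pyRange 0 (data.length : Int) 1) := by
  unfold iter_max_arr
  cases reverse with
  | false =>
    simp only [Bool.false_eq_true, if_false]
    by_cases hn : data.length = 0
    · rw [hn]
      rw [PySem.List.pyRange_one_eq_nil (by omega)]
      simp [aLoop, bGo]
    · have hpos : (0 : Int) < (data.length : Int) := by
        have := Nat.pos_of_ne_zero hn; exact_mod_cast this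
      rw [PySem.List.pyRange_one_cons hpos, bGo_none_eq_some,
          ← PySem.List.pyRange_one_cons hpos]
      exact aLoop_fwd data data.length 0 0 le_rfl (by omega)
  | true =>
    simp only [if_true]
    by_cases hn : data.length = 0
    · rw [hn]
      rw [PySem.List.pyRange_neg_one_eq_nil (by norm_num)]
      simp [aLoop, bGo]
    · have hpos : (0 : Int) < (data.length : Int) := by
        have := Nat.pos_of_ne_zero hn; exact_mod_cast this
      rw [PySem.List.pyRange_neg_one_cons (by omega), bGo_none_eq_some,
          ← PySem.List.pyRange_neg_one_cons (by omega)]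
      exact aLoop_bwd data data.length ((data.length : Int) - 1) ((data.length : Int) - 1)
        (by omega) (by omega)

-- bStep commutes with a cons when the tail is nonempty (it only reads the last record and appends).
theorem bStep_cons (data : List Int) (r : Nat × Int) (s : List (Nat × Int)) (x : Nat × Int)
    (hs : s ≠ []) : bStep data (r :: s) x = r :: bStep data s x := by
  cases s with
  | nil => exact absurd rfl hs
  | cons y ys =>
    unfold bStep
    rw [List.getLast?_cons_cons]
    cases h : (y :: ys).getLast? with
    | none => simp at h
    | some p =>
      cases p with
      | mk t j => by_cases hc : PySem.List.pyGetD data x.2 0 > PySem.List.pyGetD data j 0 <;> simp [hc]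

theorem bStep_ne_nil (data : List Int) (s : List (Nat × Int)) (x : Nat × Int) (hs : s ≠ []) :
    bStep data s x ≠ [] := by
  unfold bStep
  cases h : s.getLast? with
  | none => simpa using hs
  | some p =>
    cases p with
    | mk t j =>
      by_cases hc : PySem.List.pyGetD data x.2 0 > PySem.List.pyGetD data j 0 <;> simp [hc, hs]

theorem foldl_bStep_cons (data : List Int) (xs : List (Nat × Int)) :
    ∀ (r : Nat × Int) (s : List (Nat × Int)), s ≠ [] →
      List.foldl (bStep data) (r :: s) xs = r :: List.foldl (bStep data) s xs := by
  induction xs with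
  | nil => intro r s hs; rfl
  | cons x xs ih =>
    intro r s hs
    simp only [List.foldl_cons]
    rw [bStep_cons data r s x hs]
    exact ih r _ (bStep_ne_nil data s x hs)

-- The fold never changes the head record.
theorem foldl_bStep_head (data : List Int) (xs : List (Nat × Int)) :
    ∀ (r : Nat × Int) (s : List (Nat × Int)),
      ∃ s', List.foldl (bStep data) (r :: s) xs = r :: s' := by
  induction xs with
  | nil => intro r s; exact ⟨s, rfl⟩
  | cons x xs ih =>
    intro r s
    simp only [List.foldl_cons]
    have hstep : ∃ s'', bStep data (r :: s) x = r :: s'' := by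
      unfold bStep
      cases h : (r :: s).getLast? with
      | none => simp at h
      | some p =>
        cases p with
        | mk t j =>
          by_cases hc : PySem.List.pyGetD data x.2 0 > PySem.List.pyGetD data j 0 <;>
            simp [hc]
    obtain ⟨s'', hs''⟩ := hstep
    rw [hs'']
    exact ih r s''

-- Core invariant: expanding the fold's records from a single open record (tj, j), with the
-- remaining elements enumerated from position t, yields j repeated (t - tj) times followed by
-- the running-best outputs.
theorem expand_foldl (data : List Int) (n : Nat) :
    ∀ (rest : List Int) (t tj : Nat) (j : Int), tj ≤ t → t + rest.length = n →
      bExpand n (List.foldl (bStep data) [(tj, j)] (bEnum t rest)) =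
        List.replicate (t - tj) j ++ bGo data (some j) rest := by
  intro rest
  induction rest with
  | nil =>
    intro t tj j htj hn
    simp only [bEnum, List.foldl_nil, bExpand, bGo, List.append_nil]
    have : t = n := by simpa using hn
    subst this
    rfl
  | cons i rest' ih =>
    intro t tj j htj hn
    simp only [bEnum, List.foldl_cons]
    have hstep : bStep data [(tj, j)] (t, i) =
        if PySem.List.pyGetD data i 0 > PySem.List.pyGetD data j 0
        then [(tj, j), (t, i)] else [(tj, j)] := by
      unfold bStep; simp
    rw [hstep]
    by_cases hc : PySem.List.pyGetD data i 0 > PySem.List.pyGetD data j 0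
    · rw [if_pos hc]
      rw [show ([(tj, j), (t, i)] : List (Nat × Int)) = (tj, j) :: [(t, i)] from rfl,
          foldl_bStep_cons data _ _ _ (by simp)]
      obtain ⟨s', hs'⟩ := foldl_bStep_head data (bEnum (t + 1) rest') (t, i) []
      have hrec := ih (t + 1) t i (by omega) (by simp at hn; omega)
      rw [hs'] at hrec ⊢
      have h1 : bExpand n ((tj, j) :: (t, i) :: s') =
          List.replicate (t - tj) j ++ bExpand n ((t, i) :: s') := rfl
      rw [h1, hrec, show t + 1 - t = 1 by omega]
      simp [bGo, hc]
    · rw [if_neg hc]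
      have hrec := ih (t + 1) tj j (by omega) (by simp at hn; omega)
      rw [hrec]
      simp only [bGo, hc]
      have : List.replicate (t + 1 - tj) j = List.replicate (t - tj) j ++ [j] := by
        rw [show t + 1 - tj = (t - tj) + 1 by omega, List.replicate_succ']
      rw [this, List.append_assoc]
      rfl

-- B equals the running-best fold over any order list of length data.length.
theorem B_eq_bGo (data : List Int) (order : List Int) (hlen : order.length = data.length) :
    bExpand data.length (List.foldl (bStep data) [] (bEnum 0 order)) = bGo data none order := by
  cases order with
  | nil => simp [bEnum, bExpand, bGo]
  | cons i0 rest =>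
    simp only [bEnum, List.foldl_cons]
    rw [show bStep data [] (0, i0) = [(0, i0)] from rfl]
    rw [expand_foldl data data.length rest 1 0 i0 (by omega) (by simp at hlen; omega)]
    simp [bGo]

-- ===== VERDICT (by name: the statement is the Claim_ definition above) =====
theorem iter_max_arr_spec : Claim_equal_iter_max_arr := by
  intro data reverse _
  unfold Spec_iter_max_arr iter_max_arr_alt
  rw [A_eq_bGo]
  cases reverse with
  | false =>
    simp only [Bool.false_eq_true, if_false]
    rw [B_eq_bGo data _ (by simp [PySem.List.length_pyRange_one])]
  | true =>
    simp only [if_true]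
    rw [B_eq_bGo data _ (by
      rw [PySem.List.pyRange_neg_one]
      simp)]
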